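-- pv_equiv track=rewrite | github.com/zzz136454872/leetcode | addMinimum.py | addMinimum
-- ===== SOURCE A (Python) =====
-- def addMinimum(word: str) -> int:
--     i = 0
--     j = 0
--     s = 'abc'
--     r = 0
--
--     while i < len(word):
--         while s[j] != word[i]:
--             j = (j + 1) % 3
--             r += 1
--         j = (j + 1) % 3
--         i += 1
--
--     if j > 0:
--         r += 3 - j
--
--     return r
-- ===== SOURCE B (Python) =====
-- def addMinimum(word: str) -> int:
--     if not word:
--         return 0
--     groups = 1
--     for prev, cur in zip(word, word[1:]):
--         if cur <= prev:
--             groups += 1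
--     return 3 * groups - len(word)
-- ===== Notes on version B (the rewrite author's own statement) =====
-- stated objective: simpler
-- what changed: Replaces A's pointer simulation through the 'abc' cycle (inner while advancing j mod 3 per character) with a single adjacent-pair pass counting block starts (cur <= prev) and the closed form 3*groups - len(word).
import Mathlib
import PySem

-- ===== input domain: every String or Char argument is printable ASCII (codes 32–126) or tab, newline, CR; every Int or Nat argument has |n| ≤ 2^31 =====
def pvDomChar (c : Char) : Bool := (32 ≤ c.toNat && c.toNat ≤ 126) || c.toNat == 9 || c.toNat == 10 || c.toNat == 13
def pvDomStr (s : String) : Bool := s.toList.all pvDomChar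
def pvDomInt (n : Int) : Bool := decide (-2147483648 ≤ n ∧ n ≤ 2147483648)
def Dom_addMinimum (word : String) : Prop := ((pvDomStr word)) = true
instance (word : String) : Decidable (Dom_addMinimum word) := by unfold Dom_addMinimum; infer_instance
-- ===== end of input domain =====

-- B replaces A's pointer simulation over the 'abc' cycle by one adjacent-pair pass counting
-- block starts plus the closed form 3*groups - len(word); objective: simpler.

-- ===== PORT A =====
-- s = 'abc' indexed by j ∈ {0,1,2}
def pvSChar (j : Nat) : Char := if j = 0 then 'a' else if j = 1 then 'b' else 'c'

-- inner `while s[j] != word[i]` loop: j cycles mod 3, so fuel 3 suffices; `none` marks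
-- the inputs on which the Python inner while never terminates (character not in 'abc').
def pvInner : Nat → Char → Int → Nat → Option (Nat × Int)
  | _, _, _, 0 => none
  | j, c, r, fuel + 1 => if pvSChar j = c then some (j, r) else pvInner ((j + 1) % 3) c (r + 1) fuel

-- outer `while i < len(word)` loop over the characters of word
def pvLoopA : List Char → Nat → Int → Option (Nat × Int)
  | [], j, r => some (j, r)
  | c :: cs, j, r =>
      match pvInner j c r 3 with
      | none => none
      | some (j', r') => pvLoopA cs ((j' + 1) % 3) r'

-- trailing `if j > 0: r += 3 - j; return r` (the `none` branch is unreachable on Pre_)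
def pvFinishA : Option (Nat × Int) → Int
  | none => 0
  | some (j, r) => if 0 < j then r + (3 - (j : Int)) else r

def addMinimum (word : String) : Int := pvFinishA (pvLoopA word.toList 0 0)

-- ===== PORT B =====
def addMinimum_alt (word : String) : Int :=
  if word.toList = [] then 0
  else
    let l := word.toList
    let groups : Int :=
      (l.zip (l.drop 1)).foldl (fun g p => if p.2 ≤ p.1 then g + 1 else g) 1
    3 * groups - (l.length : Int)

-- ===== PRECONDITION & SPEC =====
-- Pre_ admits exactly the strings over the alphabet {'a','b','c'}: on any string containing
-- another character the Python A's inner while loop never terminates (A does not return).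
def Pre_addMinimum (word : String) : Prop :=
  (word.toList.all (fun c => c == 'a' || c == 'b' || c == 'c')) = true
instance (word : String) : Decidable (Pre_addMinimum word) := by unfold Pre_addMinimum; infer_instance

def pvWitness_addMinimum : String := "aabcbc"

def Spec_addMinimum (word : String) (out : Int) : Prop := out = addMinimum_alt word
instance (word : String) (out : Int) : Decidable (Spec_addMinimum word out) := by unfold Spec_addMinimum; infer_instance

-- ===== CLAIM (what is proved, stated in full; the proofs are below) =====
def Claim_equal_addMinimum : Prop := ∀ (word : String), Dom_addMinimum word → Pre_addMinimum word → Spec_addMinimum word (addMinimum word)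

-- ===== LEMMAS AND PROOFS =====

-- index of a character of 'abc' in the cycle
def pvIdx (c : Char) : Nat := if c = 'a' then 0 else if c = 'b' then 1 else 2

-- number of steps A's inner loop takes from pointer j to character c
def pvSteps (j : Nat) (c : Char) : Nat := (pvIdx c + 3 - j) % 3

-- total r contributed by A from pointer j onward, including the trailing top-up
def pvCost : List Char → Nat → Int
  | [], j => if 0 < j then 3 - (j : Int) else 0
  | c :: cs, j => (pvSteps j c : Int) + pvCost cs ((pvIdx c + 1) % 3)

-- descent count with running previous character
def pvDesc : Char → List Char → Int
  | _, [] => 0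
  | p, c :: cs => (if c ≤ p then 1 else 0) + pvDesc c cs

theorem pvInner_eq (j : Nat) (c : Char) (r : Int) (hj : j < 3)
    (hc : c = 'a' ∨ c = 'b' ∨ c = 'c') :
    pvInner j c r 3 = some (pvIdx c, r + (pvSteps j c : Int)) := by
  interval_cases j <;> rcases hc with rfl | rfl | rfl <;>
    simp [pvInner, pvSChar, pvIdx, pvSteps] <;> ring

theorem pvLoopA_eq (cs : List Char) : ∀ (j : Nat) (r : Int), j < 3 →
    (∀ c ∈ cs, c = 'a' ∨ c = 'b' ∨ c = 'c') →
    pvFinishA (pvLoopA cs j r) = r + pvCost cs j := by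
  induction cs with
  | nil =>
      intro j r _ _
      simp [pvLoopA, pvFinishA, pvCost]
      split <;> ring
  | cons c cs ih =>
      intro j r hj hall
      have hc := hall c (List.mem_cons_self ..)
      have hrest : ∀ x ∈ cs, x = 'a' ∨ x = 'b' ∨ x = 'c' := fun x hx => hall x (List.mem_cons_of_mem _ hx)
      simp only [pvLoopA, pvInner_eq j c r hj hc]
      rw [ih _ _ (Nat.mod_lt _ (by norm_num)) hrest]
      simp [pvCost]; ring

theorem pvSteps_desc (p c : Char)
    (hp : p = 'a' ∨ p = 'b' ∨ p = 'c') (hc : c = 'a' ∨ c = 'b' ∨ c = 'c') :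
    (pvSteps ((pvIdx p + 1) % 3) c : Int)
      = 3 * (if c ≤ p then 1 else 0) + (pvIdx c : Int) - (pvIdx p : Int) - 1 := by
  rcases hp with rfl | rfl | rfl <;> rcases hc with rfl | rfl | rfl <;> decide

theorem pvCost_closed (cs : List Char) : ∀ (p : Char),
    (p = 'a' ∨ p = 'b' ∨ p = 'c') → (∀ c ∈ cs, c = 'a' ∨ c = 'b' ∨ c = 'c') →
    pvCost cs ((pvIdx p + 1) % 3) = 3 * pvDesc p cs + 2 - (pvIdx p : Int) - (cs.length : Int) := by
  induction cs with
  | nil =>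
      intro p hp _
      rcases hp with rfl | rfl | rfl <;> decide
  | cons c cs ih =>
      intro p hp hall
      have hc := hall c (List.mem_cons_self ..)
      have hrest : ∀ x ∈ cs, x = 'a' ∨ x = 'b' ∨ x = 'c' := fun x hx => hall x (List.mem_cons_of_mem _ hx)
      simp only [pvCost, pvDesc, pvSteps_desc p c hp hc, ih c hc hrest, List.length_cons]
      push_cast
      ring

theorem pvFold_desc (cs : List Char) : ∀ (p : Char) (a : Int),
    (List.zip (p :: cs) cs).foldl (fun g q => if q.2 ≤ q.1 then g + 1 else g) a
      = a + pvDesc p cs := by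
  induction cs with
  | nil => intro p a; simp [pvDesc]
  | cons c cs ih =>
      intro p a
      simp only [List.zip_cons_cons, List.foldl_cons, ih c, pvDesc]
      split <;> ring

theorem pvIdx_lt (c : Char) : pvIdx c < 3 := by
  unfold pvIdx; split <;> [omega; split <;> omega]

-- ===== VERDICT (by name: the statement is the Claim_ definition above) =====
theorem addMinimum_spec : Claim_equal_addMinimum := by
  intro word _ hpre
  have hpre' : ∀ c ∈ word.toList, c = 'a' ∨ c = 'b' ∨ c = 'c' := by
    intro c hc
    have := List.all_eq_true.mp hpre c hc
    rcases (by simpa using this : (c = 'a' ∨ c = 'b') ∨ c = 'c') with (h|h)|h <;> tauto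
  unfold Spec_addMinimum addMinimum addMinimum_alt
  cases hl : word.toList with
  | nil => simp [pvLoopA, pvFinishA]
  | cons c cs =>
      have hall : ∀ x ∈ c :: cs, x = 'a' ∨ x = 'b' ∨ x = 'c' := by
        intro x hx; exact hpre' x (hl ▸ hx)
      have hc := hall c (List.mem_cons_self ..)
      have hrest : ∀ x ∈ cs, x = 'a' ∨ x = 'b' ∨ x = 'c' := fun x hx => hall x (List.mem_cons_of_mem _ hx)
      rw [pvLoopA_eq _ 0 0 (by norm_num) hall]
      simp only [pvCost, pvCost_closed cs c hc hrest, List.drop_one, List.tail_cons,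
        pvFold_desc, List.length_cons, if_neg (List.cons_ne_nil c cs)]
      have : pvSteps 0 c = pvIdx c := by
        have := pvIdx_lt c; unfold pvSteps; omega
      rw [this]
      push_cast
      ring
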